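-- pv_equiv track=rewrite | github.com/makinacorpus/django-coop | ionyweb_plugins/page_members/templatetags/pager.py | pick_pages
-- ===== SOURCE A (Python) =====
-- def insert_ellipse(lst, ellipse=0):
--     '''Insert ellipse where it's not sequential
--
--     An ellipse is represented by @ellipse.
--
--     E.g.:
--         [1, 2, 5] -> [1, 2, 0, 5]
--         [1, 2, 4] -> [1, 2, 3, 4]
--
--     The last example is that if only one step is missing, just add it instead
--     of an ellipse.
--     '''
--
--     if len(lst) <= 1:
--         return list(lst[:])
--     gap = lst[1] - lst[0]
--     if gap <= 1:
--         return [lst[0]] + insert_ellipse(lst[1:], ellipse)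
--     elif gap == 2:
--         return [lst[0], lst[0] + 1] + insert_ellipse(lst[1:], ellipse)
--     else:
--         return [lst[0], ellipse] + insert_ellipse(lst[1:], ellipse)
--
-- def pick_pages(num_pages, current):
--     '''pick pages to display in the pager
--
--     It's like: 1 ... (x-2) (x-1) (x) (x+1) (x+2) ... N.
--     '''
--
--     ret = []
--
--     for p in range(current - 2, current):
--         if p >= 1:
--             ret.append(p)
--     ret.append(current)
--     for p in range(current + 1, current + 3):
--         if p <= num_pages:
--             ret.append(p)
--
--     if ret[0] != 1:
--         ret.insert(0, 1)
--     if ret[-1] != num_pages: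
--         ret.append(num_pages)
--     ret = insert_ellipse(ret)
--
--     return ret
-- ===== SOURCE B (Python) =====
-- def pick_pages(num_pages, current):
--     '''pick pages to display in the pager
--
--     It's like: 1 ... (x-2) (x-1) (x) (x+1) (x+2) ... N.
--     '''
--     cand = [p for p in range(current - 2, current) if p >= 1]
--     cand.append(current)
--     cand += [p for p in range(current + 1, current + 3) if p <= num_pages]
--     if cand[0] != 1:
--         cand = [1] + cand
--     if cand[-1] != num_pages:
--         cand = cand + [num_pages]
--     # single iterative pass over adjacent pairs instead of the recursive insert_ellipse
--     out = []
--     for x, y in zip(cand, cand[1:]):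
--         out.append(x)
--         gap = y - x
--         if gap == 2:
--             out.append(x + 1)
--         elif gap > 2:
--             out.append(0)
--     out.append(cand[-1])
--     return out
-- ===== Notes on version B (the rewrite author's own statement) =====
-- stated objective: simpler
-- what changed: The recursive insert_ellipse helper (rebuilding a list per step via slicing and list concatenation) is replaced by one iterative pass over adjacent pairs of the candidate list that appends the filler page or the ellipse marker directly.
import Mathlib
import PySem

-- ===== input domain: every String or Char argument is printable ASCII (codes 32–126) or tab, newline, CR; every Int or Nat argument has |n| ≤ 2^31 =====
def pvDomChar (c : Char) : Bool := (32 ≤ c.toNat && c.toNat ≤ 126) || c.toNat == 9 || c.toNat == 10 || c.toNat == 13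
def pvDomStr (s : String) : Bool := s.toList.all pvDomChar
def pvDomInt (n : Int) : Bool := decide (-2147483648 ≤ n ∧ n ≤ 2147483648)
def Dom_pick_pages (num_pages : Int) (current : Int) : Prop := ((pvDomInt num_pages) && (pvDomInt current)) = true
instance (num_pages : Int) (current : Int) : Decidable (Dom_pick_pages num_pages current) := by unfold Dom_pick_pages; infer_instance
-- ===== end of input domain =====

-- B replaces the recursive insert_ellipse with one iterative pass over adjacent pairs (simpler, no per-step slicing).

-- ===== PORT A =====
def insert_ellipse (lst : List Int) (ellipse : Int) : List Int :=
  match lst with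
  | [] => []
  | [x] => [x]
  | x :: y :: rest =>
    let gap := y - x
    if gap ≤ 1 then x :: insert_ellipse (y :: rest) ellipse
    else if gap = 2 then x :: (x + 1) :: insert_ellipse (y :: rest) ellipse
    else x :: ellipse :: insert_ellipse (y :: rest) ellipse

def pick_pages (num_pages : Int) (current : Int) : List Int :=
  let ret : List Int := (PySem.List.pyRange (current - 2) current 1).foldl
      (fun acc p => if p ≥ 1 then acc ++ [p] else acc) []
  let ret := ret ++ [current]
  let ret := (PySem.List.pyRange (current + 1) (current + 3) 1).foldl
      (fun acc p => if p ≤ num_pages then acc ++ [p] else acc) ret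
  let ret := if PySem.List.pyGet? ret 0 ≠ some 1 then 1 :: ret else ret
  let ret := if PySem.List.pyGet? ret (-1) ≠ some num_pages then ret ++ [num_pages] else ret
  insert_ellipse ret 0

-- ===== PORT B =====
-- loop body of B's 'for x, y in zip(cand, cand[1:])'
def pairStep (out : List Int) (xy : Int × Int) : List Int :=
  let out := out ++ [xy.1]
  let gap := xy.2 - xy.1
  if gap = 2 then out ++ [xy.1 + 1]
  else if gap > 2 then out ++ [0]
  else out

def pick_pages_alt (num_pages : Int) (current : Int) : List Int :=
  let cand : List Int := (PySem.List.pyRange (current - 2) current 1).filter (fun p => p ≥ 1)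
  let cand := cand ++ [current]
  let cand := cand ++ (PySem.List.pyRange (current + 1) (current + 3) 1).filter (fun p => p ≤ num_pages)
  let cand := if PySem.List.pyGet? cand 0 ≠ some 1 then 1 :: cand else cand
  let cand := if PySem.List.pyGet? cand (-1) ≠ some num_pages then cand ++ [num_pages] else cand
  let out := (cand.zip cand.tail).foldl pairStep []
  match PySem.List.pyGet? cand (-1) with      -- cand[-1]; cand is never empty
  | some v => out ++ [v]
  | none => out

-- ===== PRECONDITION & SPEC =====
def Spec_pick_pages (num_pages : Int) (current : Int) (out : List Int) : Prop := out = pick_pages_alt num_pages current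
instance (num_pages : Int) (current : Int) (out : List Int) : Decidable (Spec_pick_pages num_pages current out) := by unfold Spec_pick_pages; infer_instance

-- ===== CLAIM (what is proved, stated in full; the proofs are below) =====
def Claim_equal_pick_pages : Prop := ∀ (num_pages : Int) (current : Int), Dom_pick_pages num_pages current → Spec_pick_pages num_pages current (pick_pages num_pages current)

-- ===== LEMMAS AND PROOFS =====

def pairEmit (xy : Int × Int) : List Int :=
  xy.1 :: (if xy.2 - xy.1 = 2 then [xy.1 + 1] else if xy.2 - xy.1 > 2 then [0] else [])

theorem pairStep_eq (acc : List Int) (xy : Int × Int) : pairStep acc xy = acc ++ pairEmit xy := by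
  simp only [pairStep, pairEmit]
  split_ifs <;> simp

theorem foldl_pairStep (l : List (Int × Int)) (acc : List Int) :
    l.foldl pairStep acc = acc ++ l.flatMap pairEmit := by
  rw [show pairStep = (fun a (x : Int × Int) => a ++ pairEmit x) from funext fun a => funext fun x => pairStep_eq a x]
  exact PySem.List.foldl_append_eq_flatMap pairEmit l acc

theorem pass_eq : ∀ (rest : List Int) (x : Int),
    (match (x :: rest).getLast? with
     | some v => ((x :: rest).zip rest).flatMap pairEmit ++ [v]
     | none => ((x :: rest).zip rest).flatMap pairEmit) = insert_ellipse (x :: rest) 0 := by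
  intro rest
  induction rest with
  | nil => intro x; simp [insert_ellipse]
  | cons y r ih =>
    intro x
    cases hlast : (y :: r).getLast? with
    | none => simp at hlast
    | some v =>
      have hih := ih y
      rw [hlast] at hih
      simp only [List.getLast?_cons_cons, hlast]
      simp only [List.zip_cons_cons, List.flatMap_cons] at *
      by_cases h1 : y - x ≤ 1
      · simp [insert_ellipse, pairEmit, h1, show ¬(y - x = 2) by omega, show ¬(y - x > 2) by omega, ← hih]
      · by_cases h2 : y - x = 2
        · simp [insert_ellipse, pairEmit, h2, ← hih]
        · simp [insert_ellipse, pairEmit, h1, h2, show y - x > 2 by omega, ← hih]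

theorem cand_ne_nil (f1 f2 : List Int) (current np : Int) :
    (if PySem.List.pyGet? (if PySem.List.pyGet? (f1 ++ [current] ++ f2) 0 ≠ some 1 then 1 :: (f1 ++ [current] ++ f2) else f1 ++ [current] ++ f2) (-1) ≠ some np
     then (if PySem.List.pyGet? (f1 ++ [current] ++ f2) 0 ≠ some 1 then 1 :: (f1 ++ [current] ++ f2) else f1 ++ [current] ++ f2) ++ [np]
     else (if PySem.List.pyGet? (f1 ++ [current] ++ f2) 0 ≠ some 1 then 1 :: (f1 ++ [current] ++ f2) else f1 ++ [current] ++ f2)) ≠ [] := by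
  split_ifs <;> simp

-- ===== VERDICT (by name: the statement is the Claim_ definition above) =====
theorem pick_pages_spec : Claim_equal_pick_pages := by
  intro num_pages current _
  unfold Spec_pick_pages pick_pages pick_pages_alt
  dsimp only
  rw [PySem.List.foldl_append_ite_eq_filter, PySem.List.foldl_append_ite_eq_filter]
  simp only [List.nil_append]
  set f1 : List Int := (PySem.List.pyRange (current - 2) current 1).filter (fun p => p ≥ 1) with hf1
  set f2 : List Int := (PySem.List.pyRange (current + 1) (current + 3) 1).filter (fun p => p ≤ num_pages) with hf2
  rw [show f1 ++ [current] ++ f2 = (f1 ++ [current]) ++ f2 by simp]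
  set cand := (if PySem.List.pyGet? ((f1 ++ [current]) ++ f2) 0 ≠ some 1 then 1 :: ((f1 ++ [current]) ++ f2) else (f1 ++ [current]) ++ f2)
  set cand2 := (if PySem.List.pyGet? cand (-1) ≠ some num_pages then cand ++ [num_pages] else cand) with hc2
  have hne : cand2 ≠ [] := by
    have := cand_ne_nil f1 f2 current num_pages
    simpa [cand, hc2] using this
  obtain ⟨x, rest, hx⟩ := List.exists_cons_of_ne_nil hne
  rw [hx, foldl_pairStep, List.nil_append, PySem.List.pyGet?_neg_one]
  exact (pass_eq rest x).symm
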